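-- pv_equiv track=rewrite | github.com/MayankMaheshwar/DS-and-Algo-solving | leetcode/concepts.py/hotelreview.py | solve
-- ===== SOURCE A (Python) =====
-- def solve(A, B):
--     goodWords = set(A.split("_"))
--     # Making it into a set is important, as searching through a set is faster
--     V = []
--     for index in range(len(B)):
--         countGoodWords = 0
--         for word in B[index].split("_"):
--             if word in goodWords:
--                 countGoodWords += 1
--         V.append([index, countGoodWords])  # store the index and the count
--     # use the count to sort (descending order)
--     V.sort(key=lambda a: a[1], reverse=True)
--     return [x[0] for x in V]  # return the sorted list of indexes
--
--     ans = []
--     for key, value in sorted(dict.items(), key=lambda item: item[1], reverse=True):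
--         ans.append(key)
--     return ans
-- ===== SOURCE B (Python) =====
-- def solve(A, B):
--     good = set(A.split("_"))
--     counts = [len([w for w in r.split("_") if w in good]) for r in B]
--     res = []
--     for c in range(max(counts, default=-1), -1, -1):
--         res.extend(i for i, cnt in enumerate(counts) if cnt == c)
--     return res
-- ===== Notes on version B (the rewrite author's own statement) =====
-- stated objective: alternative
-- what changed: A builds (index,count) pairs and stable-sorts them descending by count; B never sorts: it computes the per-review good-word counts, then emits indices bucket-wise by scanning count values from the maximum down to 0, which reproduces the stable descending order with ascending-index ties.
import Mathlib
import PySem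

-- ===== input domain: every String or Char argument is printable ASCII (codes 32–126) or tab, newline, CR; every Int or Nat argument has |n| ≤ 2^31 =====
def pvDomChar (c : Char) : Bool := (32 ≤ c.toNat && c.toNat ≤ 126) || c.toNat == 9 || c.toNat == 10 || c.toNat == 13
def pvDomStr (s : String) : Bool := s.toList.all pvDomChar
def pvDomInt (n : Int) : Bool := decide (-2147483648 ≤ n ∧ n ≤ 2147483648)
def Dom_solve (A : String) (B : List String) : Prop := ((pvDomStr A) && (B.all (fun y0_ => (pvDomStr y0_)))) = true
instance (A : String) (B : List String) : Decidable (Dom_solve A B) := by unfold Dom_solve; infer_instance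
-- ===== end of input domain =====

-- B replaces A's stable reverse sort of (index,count) pairs by a counting-style emission:
-- scan count values from the maximum down to 0 and emit each count's indices in order (alternative decomposition, no sort).


-- s.split("_"): the separator is the non-empty literal "_", so Python's split never raises;
-- PySem.Str.split? is some there and the getD is exact.
def pvSplitU (s : String) : List String := (PySem.Str.split? s "_").getD []

-- ===== PORT A =====
def solve (A : String) (B : List String) : List Int :=
  let goodWords := PySem.Set.ofList (pvSplitU A)
  let V : List (Int × Int) :=
    (PySem.List.pyRange 0 (PySem.List.len B) 1).foldl
      (fun V index =>
        let countGoodWords : Int :=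
          (pvSplitU (PySem.List.pyGetD B index "")).foldl
            (fun acc word => if PySem.Set.contains goodWords word then acc + 1 else acc) 0
        V ++ [(index, countGoodWords)]) []
  (PySem.List.sorted V (fun a => a.2) true).map (fun x => x.1)

-- ===== PORT B =====
def solve_alt (A : String) (B : List String) : List Int :=
  let good := PySem.Set.ofList (pvSplitU A)
  let counts : List Int :=
    B.map (fun r => (((pvSplitU r).filter (fun w => PySem.Set.contains good w)).length : Int))
  let m : Int := match PySem.List.max? counts (fun x => x) with
    | none => -1
    | some v => v
  (PySem.List.pyRange m (-1) (-1)).foldl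
    (fun res c =>
      res ++ ((PySem.List.enumerate counts).filter (fun p => p.2 == c)).map (fun p => p.1)) []

-- ===== PRECONDITION & SPEC =====
def Spec_solve (A : String) (B : List String) (out : List Int) : Prop := out = solve_alt A B
instance (A : String) (B : List String) (out : List Int) : Decidable (Spec_solve A B out) := by unfold Spec_solve; infer_instance

-- ===== CLAIM (what is proved, stated in full; the proofs are below) =====
def Claim_equal_solve : Prop := ∀ (A : String) (B : List String), Dom_solve A B → Spec_solve A B (solve A B)

-- ===== LEMMAS AND PROOFS =====

-- the order realised by a stable descending sort (by .2) of pairs whose .1 strictly increases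
def pvR (a b : Int × Int) : Prop := b.2 < a.2 ∨ (a.2 = b.2 ∧ a.1 < b.1)

lemma pvR_antisymm (a b : Int × Int) (h1 : pvR a b) (h2 : pvR b a) : False := by
  unfold pvR at h1 h2; omega

lemma pv_insertBy_pairwise (x : Int × Int) (acc : List (Int × Int)) :
    acc.Pairwise pvR → (∀ b ∈ acc, b.1 < x.1) →
    (PySem.List.insertBy (fun a b => decide (b.2 < a.2)) x acc).Pairwise pvR := by
  induction acc with
  | nil => intro _ _; simp [PySem.List.insertBy, List.pairwise_cons]
  | cons y ys ih =>
    intro hp hlt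
    rw [List.pairwise_cons] at hp
    obtain ⟨hy, hys⟩ := hp
    by_cases h : y.2 < x.2
    · simp only [PySem.List.insertBy, h, decide_true, if_true]
      refine List.Pairwise.cons ?_ (List.Pairwise.cons hy hys)
      intro z hz
      rcases List.mem_cons.mp hz with rfl | hz
      · exact Or.inl h
      · have := hy z hz
        unfold pvR at this ⊢
        omega
    · simp only [PySem.List.insertBy, h, decide_false, Bool.false_eq_true, if_false]
      refine List.Pairwise.cons ?_ (ih hys (fun b hb => hlt b (List.mem_cons_of_mem _ hb)))
      intro z hz
      rw [PySem.List.mem_insertBy] at hz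
      rcases hz with hzx | hz
      · have hyx : y.1 < x.1 := hlt y (by simp)
        rw [hzx]; unfold pvR; omega
      · exact hy z hz

lemma pv_foldl_insertBy_pairwise (l : List (Int × Int)) :
    ∀ (acc : List (Int × Int)), acc.Pairwise pvR → (∀ b ∈ acc, ∀ x ∈ l, b.1 < x.1) →
    l.Pairwise (fun p q => p.1 < q.1) →
    (l.foldl (fun acc x => PySem.List.insertBy (fun a b => decide (b.2 < a.2)) x acc) acc).Pairwise pvR := by
  induction l with
  | nil => intro acc hp _ _; simpa using hp
  | cons x l ih =>
    intro acc hp hcross hl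
    rw [List.pairwise_cons] at hl
    obtain ⟨hx, hl'⟩ := hl
    simp only [List.foldl_cons]
    refine ih _ ?_ ?_ hl'
    · exact pv_insertBy_pairwise x acc hp (fun b hb => hcross b hb x (by simp))
    · intro b hb z hz
      rw [PySem.List.mem_insertBy] at hb
      rcases hb with rfl | hb
      · exact hx z hz
      · exact hcross b hb z (List.mem_cons_of_mem _ hz)

-- stable reverse sort by .2 of a list with strictly increasing .1 is pvR-sorted
lemma pv_sorted_pairwise (W : List (Int × Int)) (hW : W.Pairwise (fun p q => p.1 < q.1)) :
    (PySem.List.sorted W (fun a => a.2) true).Pairwise pvR := by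
  rw [PySem.List.sorted_rev_eq_foldl_insertBy]
  exact pv_foldl_insertBy_pairwise W [] List.Pairwise.nil (by simp) hW

-- bucket emission is a permutation of the original list
lemma pv_flatMap_filter_perm (cs : List Int) :
    ∀ (l : List (Int × Int)), (∀ p ∈ l, p.2 ∈ cs) → cs.Nodup →
    (cs.flatMap (fun c => l.filter (fun p => p.2 == c))).Perm l := by
  induction cs with
  | nil =>
    intro l hmem _
    cases l with
    | nil => simp
    | cons p l => exact absurd (hmem p (by simp)) (by simp)
  | cons c cs ih =>
    intro l hmem hnd
    rw [List.nodup_cons] at hnd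
    obtain ⟨hc, hnd'⟩ := hnd
    rw [List.flatMap_cons]
    have hcongr : cs.flatMap (fun c' => l.filter (fun p => p.2 == c'))
        = cs.flatMap (fun c' => (l.filter (fun p => !(p.2 == c))).filter (fun p => p.2 == c')) := by
      apply List.flatMap_congr
      intro c' hc'
      have hne : c' ≠ c := fun he => hc (he ▸ hc')
      rw [List.filter_filter]
      apply List.filter_congr
      intro p _
      by_cases h : p.2 = c'
      · have hpc : ¬ p.2 = c := fun hh => hne (by omega)
        simp [h, hne]
      · simp [h]
    rw [hcongr]
    have hperm := ih (l.filter (fun p => !(p.2 == c)))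
      (fun p hp => by
        have hpl : p ∈ l := List.mem_of_mem_filter hp
        rcases List.mem_cons.mp (hmem p hpl) with h | h
        · exfalso
          have := (List.mem_filter.mp hp).2
          simp [h] at this
        · exact h) hnd'
    exact List.Perm.trans (List.Perm.append_left _ hperm) (List.filter_append_perm _ l)

-- bucket emission is pvR-sorted
lemma pv_flatMap_filter_pairwise (cs : List Int) (l : List (Int × Int))
    (hl : l.Pairwise (fun p q => p.1 < q.1)) :
    cs.Pairwise (fun a b => b < a) →
    (cs.flatMap (fun c => l.filter (fun p => p.2 == c))).Pairwise pvR := by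
  induction cs with
  | nil => intro _; simp
  | cons c cs ih =>
    intro hcs
    rw [List.pairwise_cons] at hcs
    obtain ⟨hcgt, hcs'⟩ := hcs
    rw [List.flatMap_cons, List.pairwise_append]
    refine ⟨?_, ih hcs', ?_⟩
    · have hf : (l.filter (fun p => p.2 == c)).Pairwise (fun p q => p.1 < q.1) := hl.filter _
      refine List.Pairwise.imp_of_mem ?_ hf
      intro a b ha hb hab
      have ha2 : a.2 = c := by simpa using (List.mem_filter.mp ha).2
      have hb2 : b.2 = c := by simpa using (List.mem_filter.mp hb).2
      exact Or.inr ⟨by rw [ha2, hb2], hab⟩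
    · intro a ha b hb
      have ha2 : a.2 = c := by simpa using (List.mem_filter.mp ha).2
      have hblt : b.2 < c := by
        rcases List.mem_flatMap.mp hb with ⟨c', hc', hbf⟩
        have hb2 : b.2 = c' := by simpa using (List.mem_filter.mp hbf).2
        rw [hb2]; exact hcgt c' hc'
      exact Or.inl (by omega)

lemma pv_pyRange_down_pairwise (a b : Int) :
    (PySem.List.pyRange a b (-1)).Pairwise (fun x y => y < x) := by
  rw [PySem.List.pyRange_neg_one_eq_reverse, List.pairwise_reverse]
  exact PySem.List.pairwise_lt_pyRange_one _ _

-- A's counting loop equals B's filter length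
lemma pv_cnt_eq (good : PySem.Set String) (s : String) :
    (pvSplitU s).foldl
      (fun acc word => if PySem.Set.contains good word then acc + 1 else acc) (0 : Int)
    = (((pvSplitU s).filter (fun w => PySem.Set.contains good w)).length : Int) := by
  have h : ((pvSplitU s).filter (fun w => PySem.Set.contains good w))
      = ((pvSplitU s).filter good.contains) := rfl
  rw [h, PySem.List.foldl_count_if, List.countP_eq_length_filter]
  omega

-- A's index loop builds exactly enumerate(counts)
lemma pv_V_eq_enumerate (good : PySem.Set String) (B : List String) :
    ((PySem.List.pyRange 0 (PySem.List.len B) 1).foldl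
      (fun V index =>
        V ++ [(index,
          (pvSplitU (PySem.List.pyGetD B index "")).foldl
            (fun acc word => if PySem.Set.contains good word then acc + 1 else acc) (0 : Int))]) [])
    = PySem.List.enumerate
        (B.map (fun r => (((pvSplitU r).filter (fun w => PySem.Set.contains good w)).length : Int))) := by
  set cnt : String → Int :=
    fun r => (((pvSplitU r).filter (fun w => PySem.Set.contains good w)).length : Int) with hcnt
  rw [PySem.List.foldl_append_singleton_eq_map, List.nil_append]
  rw [PySem.List.enumerate_eq_map_pyRange (B.map cnt) (cnt "")]
  have hlen : PySem.List.len (B.map cnt) = PySem.List.len B := by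
    simp [PySem.List.len]
  rw [hlen]
  apply List.map_congr_left
  intro i _
  rw [PySem.List.pyGetD_map cnt B i ""]
  rw [pv_cnt_eq good (PySem.List.pyGetD B i "")]

-- main: stable reverse sort = descending bucket emission
lemma pv_sorted_eq_buckets (counts : List Int) (m : Int)
    (hub : ∀ c ∈ counts, c ≤ m) (hlb : ∀ c ∈ counts, 0 ≤ c) :
    PySem.List.sorted (PySem.List.enumerate counts) (fun a => a.2) true
    = (PySem.List.pyRange m (-1) (-1)).flatMap
        (fun c => (PySem.List.enumerate counts).filter (fun p => p.2 == c)) := by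
  have hWpw : (PySem.List.enumerate counts).Pairwise (fun p q => p.1 < q.1) :=
    PySem.List.pairwise_lt_enumerate counts 0
  have hcs := pv_pyRange_down_pairwise m (-1)
  have hnd : (PySem.List.pyRange m (-1) (-1)).Nodup :=
    hcs.imp (fun h => by omega)
  have hmem : ∀ p ∈ PySem.List.enumerate counts, p.2 ∈ PySem.List.pyRange m (-1) (-1) := by
    intro p hp
    rw [PySem.List.mem_pyRange_neg_one]
    rcases (PySem.List.mem_enumerate_iff counts 0 p).mp hp with ⟨k, hk, rfl⟩
    have hmemc : counts[k] ∈ counts := List.getElem_mem hk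
    exact ⟨by have := hlb _ hmemc; omega, hub _ hmemc⟩
  have hperm := pv_flatMap_filter_perm (PySem.List.pyRange m (-1) (-1))
    (PySem.List.enumerate counts) hmem hnd
  have hpw1 := pv_sorted_pairwise (PySem.List.enumerate counts) hWpw
  have hpw2 := pv_flatMap_filter_pairwise (PySem.List.pyRange m (-1) (-1))
    (PySem.List.enumerate counts) hWpw hcs
  have hperm2 : (PySem.List.sorted (PySem.List.enumerate counts) (fun a => a.2) true).Perm
      ((PySem.List.pyRange m (-1) (-1)).flatMap
        (fun c => (PySem.List.enumerate counts).filter (fun p => p.2 == c))) :=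
    (PySem.List.sorted_perm (PySem.List.enumerate counts) (fun a => a.2) true).trans hperm.symm
  exact List.eq_of_perm_of_sorted
    (fun a b _ _ hab hba => (pvR_antisymm a b hab hba).elim)
    hpw1 hpw2 hperm2

-- canonical forms of the two ports
lemma pv_solve_eq (A : String) (B : List String) :
    solve A B = (PySem.List.sorted
      (PySem.List.enumerate
        (B.map (fun r => (((pvSplitU r).filter
          (fun w => PySem.Set.contains (PySem.Set.ofList (pvSplitU A)) w)).length : Int))))
      (fun a => a.2) true).map (fun x => x.1) := by
  simp only [solve]
  rw [pv_V_eq_enumerate]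

lemma pv_solve_alt_eq (A : String) (B : List String) :
    solve_alt A B =
      (PySem.List.pyRange
        (match PySem.List.max?
            (B.map (fun r => (((pvSplitU r).filter
              (fun w => PySem.Set.contains (PySem.Set.ofList (pvSplitU A)) w)).length : Int)))
            (fun x => x) with
          | none => -1
          | some v => v) (-1) (-1)).flatMap
        (fun c => ((PySem.List.enumerate
          (B.map (fun r => (((pvSplitU r).filter
            (fun w => PySem.Set.contains (PySem.Set.ofList (pvSplitU A)) w)).length : Int)))).filter
          (fun p => p.2 == c)).map (fun p => p.1)) := by
  simp only [solve_alt]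
  rw [PySem.List.foldl_append_eq_flatMap, List.nil_append]

-- ===== VERDICT (by name: the statement is the Claim_ definition above) =====
theorem solve_spec : Claim_equal_solve := by
  intro A B _
  unfold Spec_solve
  rw [pv_solve_eq, pv_solve_alt_eq]
  rw [← List.map_flatMap]
  set good := PySem.Set.ofList (pvSplitU A) with hgood
  set counts := B.map (fun r => (((pvSplitU r).filter
    (fun w => PySem.Set.contains good w)).length : Int)) with hcounts
  congr 1
  rcases hmax : PySem.List.max? counts (fun x => x) with _ | v
  · have hnil : counts = [] := (PySem.List.max?_eq_none_iff counts _).mp hmax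
    rw [hnil]
    rw [PySem.List.pyRange_neg_one_eq_nil (le_refl (-1 : Int))]
    simp [PySem.List.sorted, PySem.List.enumerate]
  · apply pv_sorted_eq_buckets
    · exact fun c hc => PySem.List.max?_isMax hmax c hc
    · intro c hc
      rw [hcounts] at hc
      rcases List.mem_map.mp hc with ⟨r, _, rfl⟩
      positivity
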